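-- pv_equiv track=rewrite | github.com/younsuyoung12/auto-trader | backtest_realistic.py | _find_last_two_pivot_lows
-- ===== SOURCE A (Python) =====
-- def _find_last_two_pivot_lows(candles):
--     idxs = []
--     for i in range(len(candles) - 2, 1, -1):
--         if candles[i][3] < candles[i - 1][3] and candles[i][3] < candles[i + 1][3]:
--             idxs.append(i)
--             if len(idxs) == 2:
--                 break
--     return list(reversed(idxs))
-- ===== SOURCE B (Python) =====
-- def _find_last_two_pivot_lows(candles):
--     pivots = [i for i in range(2, len(candles) - 1)
--               if candles[i][3] < candles[i - 1][3] and candles[i][3] < candles[i + 1][3]]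
--     return pivots[-2:]
-- ===== Notes on version B (the rewrite author's own statement) =====
-- stated objective: simpler
-- what changed: Replaces the backward scan with a mutable accumulator and early break by a forward comprehension collecting all pivot indices and slicing the last two with pivots[-2:], removing mutation, break and the final reversal.
import Mathlib
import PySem

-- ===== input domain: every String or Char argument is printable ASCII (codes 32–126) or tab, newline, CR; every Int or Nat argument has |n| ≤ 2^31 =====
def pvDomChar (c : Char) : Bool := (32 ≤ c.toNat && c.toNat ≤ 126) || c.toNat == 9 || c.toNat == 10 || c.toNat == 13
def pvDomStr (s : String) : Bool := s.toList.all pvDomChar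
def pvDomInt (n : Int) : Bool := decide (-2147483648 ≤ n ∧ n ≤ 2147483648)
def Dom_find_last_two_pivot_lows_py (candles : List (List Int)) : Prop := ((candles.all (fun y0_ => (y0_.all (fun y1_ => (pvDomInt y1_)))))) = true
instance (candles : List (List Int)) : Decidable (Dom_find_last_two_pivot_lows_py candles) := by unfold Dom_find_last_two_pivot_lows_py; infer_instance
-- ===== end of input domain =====

-- B replaces A's backward scan with mutable accumulator and early break by a forward
-- comprehension over all pivot indices followed by a [-2:] slice (objective: simpler).

-- shared accessor: candles[i][3] (total stand-in; Pre_ guarantees both indexings are in range)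
def pvLow (cs : List (List Int)) (i : Int) : Int :=
  ((PySem.List.pyGet? cs i).bind (fun r => PySem.List.pyGet? r 3)).getD 0

-- shared pivot-low test: candles[i][3] < candles[i-1][3] and candles[i][3] < candles[i+1][3]
def pvPiv (cs : List (List Int)) (i : Int) : Bool :=
  decide (pvLow cs i < pvLow cs (i - 1)) && decide (pvLow cs i < pvLow cs (i + 1))

-- ===== PORT A =====
-- the for-loop of A: current index as a Nat (the loop runs from len-2 down to 2), idxs the accumulator
def pvALoop (cs : List (List Int)) : Nat → List Int → List Int
  | 0, idxs => idxs
  | 1, idxs => idxs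
  | n + 2, idxs =>
      if pvPiv cs ((n : Int) + 2) then
        let idxs' := idxs ++ [(n : Int) + 2]
        if idxs'.length = 2 then idxs' else pvALoop cs (n + 1) idxs'
      else pvALoop cs (n + 1) idxs

def find_last_two_pivot_lows_py (candles : List (List Int)) : List Int :=
  (pvALoop candles (candles.length - 2) []).reverse

-- ===== PORT B =====
def find_last_two_pivot_lows_py_alt (candles : List (List Int)) : List Int :=
  let pivots := (PySem.List.pyRange 2 ((candles.length : Int) - 1) 1).filter (pvPiv candles)
  PySem.List.slice pivots (some (-2)) none

-- ===== PRECONDITION & SPEC =====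
-- Pre_ excludes candle lists of length ≥ 4 containing a row after the first with fewer than
-- 4 entries: there the row[3] indexing raises IndexError (in A unless its early break stops
-- first, in which case A returns while B raises; see the cite).
def Pre_find_last_two_pivot_lows_py (candles : List (List Int)) : Prop :=
  candles.length < 4 ∨ ∀ c ∈ candles.drop 1, 4 ≤ c.length

instance (candles : List (List Int)) : Decidable (Pre_find_last_two_pivot_lows_py candles) := by
  unfold Pre_find_last_two_pivot_lows_py; infer_instance

def pvWitness_find_last_two_pivot_lows_py : List (List Int) :=
  [[0,0,0,9],[0,0,0,5],[0,0,0,1],[0,0,0,5],[0,0,0,2],[0,0,0,6]]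

def Spec_find_last_two_pivot_lows_py (candles : List (List Int)) (out : List Int) : Prop := out = find_last_two_pivot_lows_py_alt candles
instance (candles : List (List Int)) (out : List Int) : Decidable (Spec_find_last_two_pivot_lows_py candles out) := by unfold Spec_find_last_two_pivot_lows_py; infer_instance

-- ===== CLAIM (what is proved, stated in full; the proofs are below) =====
def Claim_equal_find_last_two_pivot_lows_py : Prop := ∀ (candles : List (List Int)), Dom_find_last_two_pivot_lows_py candles → Pre_find_last_two_pivot_lows_py candles → Spec_find_last_two_pivot_lows_py candles (find_last_two_pivot_lows_py candles)

-- ===== LEMMAS AND PROOFS =====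

-- descending index list n, n-1, ..., 2 (as Ints); the order A's loop visits
def pvDesc : Nat → List Int
  | 0 => []
  | 1 => []
  | n + 2 => ((n : Int) + 2) :: pvDesc (n + 1)

theorem pvALoop_eq (cs : List (List Int)) (n : Nat) (idxs : List Int) :
    idxs.length ≤ 1 →
    pvALoop cs n idxs = idxs ++ ((pvDesc n).filter (pvPiv cs)).take (2 - idxs.length) := by
  induction n, idxs using pvALoop.induct cs with
  | case1 idxs => intro _; simp [pvALoop, pvDesc]
  | case2 idxs => intro _; simp [pvALoop, pvDesc]
  | case3 n idxs hp _i hlen =>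
      intro h
      have hlen' : (idxs ++ [(n : Int) + 2]).length = 2 := hlen
      have h1 : idxs.length = 1 := by simp at hlen'; omega
      simp [pvALoop, hp, pvDesc, h1]
  | case4 n idxs hp _i hlen ih =>
      intro h
      have hlen' : ¬ (idxs ++ [(n : Int) + 2]).length = 2 := hlen
      have h1 : idxs.length = 0 := by simp at hlen'; omega
      have ih' : pvALoop cs (n + 1) (idxs ++ [(n : Int) + 2]) =
          (idxs ++ [(n : Int) + 2]) ++
            List.take (2 - (idxs ++ [(n : Int) + 2]).length) (List.filter (pvPiv cs) (pvDesc (n + 1))) :=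
        ih (by show (idxs ++ [(n : Int) + 2]).length ≤ 1; simp [h1])
      simp only [pvALoop, hp, if_true, if_neg hlen']
      rw [ih']
      simp [pvDesc, hp, h1]
  | case5 n idxs hp ih =>
      intro h
      simp only [pvALoop, if_neg hp]
      rw [ih h]
      simp [pvDesc, hp]

theorem pvDesc_eq_reverse (n : Nat) :
    pvDesc n = (PySem.List.pyRange 2 ((n : Int) + 1) 1).reverse := by
  induction n using pvDesc.induct with
  | case1 => rfl
  | case2 => rfl
  | case3 n ih =>
      have hcast : ((n + 2 : Nat) : Int) + 1 = ((n : Int) + 2) + 1 := by push_cast; ring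
      rw [pvDesc, hcast, PySem.List.pyRange_one_succ_right (by omega)]
      have : ((n + 1 : Nat) : Int) + 1 = (n : Int) + 2 := by push_cast; ring
      rw [this] at ih
      simp [ih]

theorem pvRange_bound_eq (L : Nat) :
    PySem.List.pyRange 2 (((L - 2 : Nat) : Int) + 1) 1 = PySem.List.pyRange 2 ((L : Int) - 1) 1 := by
  match L with
  | 0 => rfl
  | 1 => rfl
  | n + 2 => congr 1; push_cast; ring

-- ===== VERDICT (by name: the statement is the Claim_ definition above) =====
theorem find_last_two_pivot_lows_py_spec : Claim_equal_find_last_two_pivot_lows_py := by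
  intro cs _ _
  unfold Spec_find_last_two_pivot_lows_py find_last_two_pivot_lows_py find_last_two_pivot_lows_py_alt
  rw [pvALoop_eq cs (cs.length - 2) [] (by simp)]
  rw [pvDesc_eq_reverse, pvRange_bound_eq, List.filter_reverse, List.take_reverse]
  rw [PySem.List.slice_from_neg_ofNat _ 2 (by norm_num)]
  simp
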